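-- pv_equiv track=rewrite | github.com/GenesisL1/web3desk | gl1_api.py | _parse_dec_to_scaled18
-- ===== SOURCE A (Python) =====
-- def _parse_dec_to_scaled18(dec_str: str) -> int:
--     """
--     Parse sdk.Dec-style decimal string into integer scaled by 1e18.
--     Example: "12.34" => 12340000000000000000
--     """
--     s0 = str(dec_str or "0").strip()
--     if not s0:
--         return 0
--     neg = s0.startswith("-")
--     if neg:
--         s0 = s0[1:]
--     whole, dot, frac = s0.partition(".")
--     whole = "".join(ch for ch in whole if ch.isdigit()) or "0"
--     frac = "".join(ch for ch in frac if ch.isdigit())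
--     frac18 = (frac + "0" * 18)[:18]
--     val = int(whole) * (10 ** 18) + int(frac18 or "0")
--     return -val if neg else val
-- ===== SOURCE B (Python) =====
-- def _parse_dec_to_scaled18(dec_str: str) -> int:
--     """
--     Parse sdk.Dec-style decimal string into integer scaled by 1e18,
--     in one numeric pass (Horner accumulation) instead of building
--     filtered strings and re-parsing them with int().
--     """
--     s0 = str(dec_str or "0").strip()
--     if not s0:
--         return 0
--     neg = s0.startswith("-")
--     if neg:
--         s0 = s0[1:]
--     acc = 0
--     frac_digits = 0
--     seen_dot = False
--     for ch in s0:
--         if ch == "." and not seen_dot: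
--             seen_dot = True
--         elif ch.isdigit():
--             if not seen_dot:
--                 acc = acc * 10 + int(ch)
--             elif frac_digits < 18:
--                 acc = acc * 10 + int(ch)
--                 frac_digits += 1
--     val = acc * 10 ** (18 - frac_digits)
--     return -val if neg else val
-- ===== Notes on version B (the rewrite author's own statement) =====
-- stated objective: alternative
-- what changed: Replaces partition + two digit-filter comprehensions + string re-parsing via int() by a single stateful character scan that accumulates the value numerically (Horner) with a seen-dot flag and an 18-digit fraction counter, then one final scaling multiplication.
import Mathlib
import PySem

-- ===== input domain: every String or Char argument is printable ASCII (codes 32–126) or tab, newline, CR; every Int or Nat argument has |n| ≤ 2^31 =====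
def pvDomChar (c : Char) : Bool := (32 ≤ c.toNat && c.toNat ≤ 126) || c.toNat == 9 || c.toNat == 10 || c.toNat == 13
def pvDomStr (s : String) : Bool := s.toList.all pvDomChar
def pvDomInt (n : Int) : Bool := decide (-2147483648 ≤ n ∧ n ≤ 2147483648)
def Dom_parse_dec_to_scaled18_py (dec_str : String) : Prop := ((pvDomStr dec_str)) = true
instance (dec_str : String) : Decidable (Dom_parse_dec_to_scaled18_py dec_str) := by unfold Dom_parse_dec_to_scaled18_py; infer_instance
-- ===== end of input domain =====

-- B replaces A's partition + digit-filter comprehensions + int() re-parsing by one numeric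
-- Horner scan with a seen-dot flag and an 18-digit fraction counter (same cost, different decomposition).

-- ===== PORT A =====
-- int(ds) for a digit-only character list, ported by hand as the decimal Horner fold
-- (exact there; both call sites of int() in A pass nonempty digit-only strings by construction).
def pvIntOfDigits (cs : List Char) : Int :=
  cs.foldl (fun a c => a * 10 + ((c.toNat : Int) - 48)) 0

def parse_dec_to_scaled18_py (dec_str : String) : Int :=
  -- s0 = str(dec_str or "0").strip()
  let s0 := PySem.Chars.strip (if dec_str = "" then "0" else dec_str).toList
  if s0 = [] then 0
  else
    let neg := PySem.Chars.startswith s0 ['-']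
    let s1 := if neg then PySem.List.slice s0 (some 1) none else s0
    -- whole, dot, frac = s0.partition(".")  (hand-ported: PySem has no partition; exact)
    let whole := s1.takeWhile (fun c => c != '.')
    let frac := (s1.dropWhile (fun c => c != '.')).tail
    let wholeD := (if whole.filter PySem.Chars.isdigit = [] then ['0']
                   else whole.filter PySem.Chars.isdigit)
    let fracD := frac.filter PySem.Chars.isdigit
    let frac18 := (fracD ++ List.replicate 18 '0').take 18
    let val := pvIntOfDigits wholeD * 10 ^ 18
               + pvIntOfDigits (if frac18 = [] then ['0'] else frac18)
    if neg then -val else val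

-- ===== PORT B =====
-- the single stateful pass of Source B: state = (acc, frac_digits, seen_dot)
def pvAltLoop : List Char → Int → Nat → Bool → Int × Nat
  | [], acc, f, _ => (acc, f)
  | c :: cs, acc, f, seen =>
    if c == '.' && !seen then pvAltLoop cs acc f true
    else if PySem.Chars.isdigit c then
      (if !seen then pvAltLoop cs (acc * 10 + ((c.toNat : Int) - 48)) f seen
       else if f < 18 then pvAltLoop cs (acc * 10 + ((c.toNat : Int) - 48)) (f + 1) seen
       else pvAltLoop cs acc f seen)
    else pvAltLoop cs acc f seen

def parse_dec_to_scaled18_py_alt (dec_str : String) : Int :=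
  let s0 := PySem.Chars.strip (if dec_str = "" then "0" else dec_str).toList
  if s0 = [] then 0
  else
    let neg := PySem.Chars.startswith s0 ['-']
    let s1 := if neg then PySem.List.slice s0 (some 1) none else s0
    let r := pvAltLoop s1 0 0 false
    let val := r.1 * 10 ^ (18 - r.2)
    if neg then -val else val

-- ===== PRECONDITION & SPEC =====
def Spec_parse_dec_to_scaled18_py (dec_str : String) (out : Int) : Prop := out = parse_dec_to_scaled18_py_alt dec_str
instance (dec_str : String) (out : Int) : Decidable (Spec_parse_dec_to_scaled18_py dec_str out) := by unfold Spec_parse_dec_to_scaled18_py; infer_instance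

-- ===== CLAIM (what is proved, stated in full; the proofs are below) =====
def Claim_equal_parse_dec_to_scaled18_py : Prop := ∀ (dec_str : String), Dom_parse_dec_to_scaled18_py dec_str → Spec_parse_dec_to_scaled18_py dec_str (parse_dec_to_scaled18_py dec_str)

-- ===== LEMMAS AND PROOFS =====

-- shift a Horner accumulator out of the fold
theorem pvHorner_shift (cs : List Char) (a : Int) :
    cs.foldl (fun a c => a * 10 + ((c.toNat : Int) - 48)) a
      = a * 10 ^ cs.length + pvIntOfDigits cs := by
  induction cs generalizing a with
  | nil => simp [pvIntOfDigits]
  | cons c cs ih =>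
    simp only [List.foldl_cons, pvIntOfDigits] at *
    rw [ih, ih (0 * 10 + ((c.toNat : Int) - 48))]
    simp only [List.length_cons, pow_succ]
    ring

theorem pvHorner_zeros (a : Int) (k : Nat) :
    (List.replicate k '0').foldl (fun a c => a * 10 + ((c.toNat : Int) - 48)) a
      = a * 10 ^ k := by
  induction k generalizing a with
  | zero => simp
  | succ k ih =>
    rw [List.replicate_succ, List.foldl_cons, ih]
    push_cast
    ring

-- whole phase of the B loop: scan up to the first '.' accumulates the filtered digits
theorem pvAltLoop_whole (s : List Char) (acc : Int) (f : Nat) :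
    pvAltLoop s acc f false
      = pvAltLoop ((s.dropWhile (fun c => c != '.')).tail)
          (((s.takeWhile (fun c => c != '.')).filter PySem.Chars.isdigit).foldl
            (fun a c => a * 10 + ((c.toNat : Int) - 48)) acc) f true := by
  induction s generalizing acc with
  | nil => simp [pvAltLoop]
  | cons c cs ih =>
    by_cases hc : c = '.'
    · subst hc
      simp [pvAltLoop, List.takeWhile, List.dropWhile]
    · by_cases hd : PySem.Chars.isdigit c
      · have hdot : (c != '.') = true := by simp [hc]
        simp [pvAltLoop, hc, hd, hdot, ih]
      · have hdot : (c != '.') = true := by simp [hc]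
        simp [pvAltLoop, hc, hd, hdot, ih]

-- fraction phase of the B loop: collects the first (18 - f) filtered digits
theorem pvAltLoop_frac (s : List Char) (acc : Int) (f : Nat) (hf : f ≤ 18) :
    pvAltLoop s acc f true
      = (((s.filter PySem.Chars.isdigit).take (18 - f)).foldl
           (fun a c => a * 10 + ((c.toNat : Int) - 48)) acc,
         f + min (18 - f) (s.filter PySem.Chars.isdigit).length) := by
  induction s generalizing acc f with
  | nil => simp [pvAltLoop]
  | cons c cs ih =>
    by_cases hd : PySem.Chars.isdigit c
    · have hc : c ≠ '.' := by
        intro h; subst h; simp [PySem.Chars.isdigit] at hd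
      by_cases hlt : f < 18
      · have h18 : 18 - f = (18 - (f + 1)) + 1 := by omega
        simp only [pvAltLoop, hd, hlt, if_true, Bool.and_false, Bool.not_true,
          Bool.false_eq_true, if_false, List.filter_cons_of_pos hd]
        rw [ih _ (f + 1) (by omega), h18, List.take_succ_cons, List.foldl_cons,
          Prod.mk.injEq, List.length_cons]
        exact ⟨rfl, by omega⟩
      · have hf18 : f = 18 := by omega
        subst hf18
        simp only [pvAltLoop, hd, hlt, if_true, if_false, Bool.and_false,
          Bool.not_true, Bool.false_eq_true, List.filter_cons_of_pos hd]
        rw [ih _ 18 (by omega)]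
        simp
    · simp only [pvAltLoop, hd, Bool.not_true, Bool.and_false, Bool.false_eq_true,
        if_false, List.filter_cons_of_neg hd]
      exact ih _ _ hf

-- pad-to-18 on the A side equals take-then-shift
theorem pvFrac18_val (F : List Char) :
    pvIntOfDigits ((F ++ List.replicate 18 '0').take 18)
      = pvIntOfDigits (F.take 18) * 10 ^ (18 - min (18 : Nat) F.length) := by
  rw [List.take_append, List.take_replicate, pvIntOfDigits, List.foldl_append,
    pvHorner_zeros]
  have : min (18 - F.length) 18 = 18 - F.length := by omega
  rw [this]
  have : (18 : Nat) - min 18 F.length = 18 - F.length := by omega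
  rw [this]
  rfl

-- the "or '0'" fallback is value-irrelevant for the Horner fold
theorem pvIntOfDigits_or_zero (cs : List Char) :
    pvIntOfDigits (if cs = [] then ['0'] else cs) = pvIntOfDigits cs := by
  split_ifs with h
  · subst h; rfl
  · rfl

-- the core equality, on an arbitrary sign-stripped character list
theorem pvCore (s : List Char) :
    (pvAltLoop s 0 0 false).1 * 10 ^ (18 - (pvAltLoop s 0 0 false).2)
      = pvIntOfDigits (if (s.takeWhile (fun c => c != '.')).filter PySem.Chars.isdigit = []
                       then ['0'] else (s.takeWhile (fun c => c != '.')).filter PySem.Chars.isdigit)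
          * 10 ^ 18
        + pvIntOfDigits
            (if ((((s.dropWhile (fun c => c != '.')).tail).filter PySem.Chars.isdigit
                    ++ List.replicate 18 '0').take 18) = []
             then ['0']
             else ((((s.dropWhile (fun c => c != '.')).tail).filter PySem.Chars.isdigit
                    ++ List.replicate 18 '0').take 18)) := by
  set W := (s.takeWhile (fun c => c != '.')).filter PySem.Chars.isdigit with hW
  set F := ((s.dropWhile (fun c => c != '.')).tail).filter PySem.Chars.isdigit with hF
  rw [pvIntOfDigits_or_zero, pvIntOfDigits_or_zero, pvFrac18_val,
    pvAltLoop_whole, pvAltLoop_frac _ _ 0 (by omega)]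
  simp only [Nat.sub_zero, Nat.zero_add, ← hF, ← hW]
  have hWv : W.foldl (fun a c => a * 10 + ((c.toNat : Int) - 48)) 0 = pvIntOfDigits W := rfl
  rw [pvHorner_shift, hWv, List.length_take, add_mul, mul_assoc, ← pow_add]
  have h18 : min (18 : Nat) F.length + (18 - min 18 F.length) = 18 := by omega
  rw [h18]

-- ===== VERDICT (by name: the statement is the Claim_ definition above) =====
theorem parse_dec_to_scaled18_py_spec : Claim_equal_parse_dec_to_scaled18_py := by
  intro dec_str _
  unfold Spec_parse_dec_to_scaled18_py parse_dec_to_scaled18_py parse_dec_to_scaled18_py_alt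
  dsimp only
  by_cases h0 : PySem.Chars.strip (if dec_str = "" then "0" else dec_str).toList = []
  · rw [if_pos h0, if_pos h0]
  · rw [if_neg h0, if_neg h0, pvCore]
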